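-- pv_equiv track=rewrite | github.com/The-Educational-Equality-Institute/myeloid-variant-pipeline | mutation_profile/scripts/ai_research/chai1_submit.py | _parse_header
-- ===== SOURCE A (Python) =====
-- def _parse_header(header: str) -> tuple[str, str]:
--     """Parse FASTA header into (entity_type, chain_name).
--
--     Handles both formats:
--         chain_A|entity_type=protein  -> (protein, chain_A)
--         protein|name=PTPN11          -> (protein, PTPN11)
--     """
--     parts = header.split("|")
--     entity_type = "protein"
--     name = parts[0]
--
--     for part in parts:
--         if part.startswith("entity_type="):
--             entity_type = part.split("=", 1)[1]
--         elif part.startswith("name="):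
--             name = part.split("=", 1)[1]
--
--     # If first part looks like chain_X and second is entity_type=..., use chain as name
--     if parts[0].startswith("chain_") and len(parts) > 1:
--         name = parts[0]
--         for p in parts[1:]:
--             if p.startswith("entity_type="):
--                 entity_type = p.split("=", 1)[1]
--
--     return entity_type, name
-- ===== SOURCE B (Python) =====
-- def _parse_header(header: str) -> tuple[str, str]:
--     """Parse FASTA header into (entity_type, chain_name) via a key=value table (last wins)."""
--     parts = header.split("|")
--     kv = {}
--     for part in parts:
--         if "=" in part:
--             k, v = part.split("=", 1)
--             kv[k] = v
--     if parts[0].startswith("chain_") and len(parts) > 1: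
--         name = parts[0]
--     else:
--         name = kv.get("name", parts[0])
--     return kv.get("entity_type", "protein"), name
-- ===== Notes on version B (the rewrite author's own statement) =====
-- stated objective: simpler
-- what changed: Replaces A's per-key prefix scans plus the redundant second scan of parts[1:] with a single pass that builds a last-wins key=value dict and two O(1) lookups.
import Mathlib
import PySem

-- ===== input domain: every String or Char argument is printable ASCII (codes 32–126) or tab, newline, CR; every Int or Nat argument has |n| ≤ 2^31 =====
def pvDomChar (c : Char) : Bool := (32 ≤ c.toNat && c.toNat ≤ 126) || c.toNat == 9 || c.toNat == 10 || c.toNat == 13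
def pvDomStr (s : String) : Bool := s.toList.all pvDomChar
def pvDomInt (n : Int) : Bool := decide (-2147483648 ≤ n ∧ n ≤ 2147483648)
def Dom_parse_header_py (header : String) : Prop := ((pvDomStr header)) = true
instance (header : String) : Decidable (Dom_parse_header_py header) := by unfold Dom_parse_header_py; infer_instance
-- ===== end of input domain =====

-- B replaces A's repeated prefix-scans (plus the redundant re-scan of parts[1:]) by one pass
-- building a last-wins key=value table and two lookups; objective: simpler/alternative, same cost class.

-- ===== PORT A =====
-- part.split("=", 1)[1]; "=" ≠ "" so splitMax? is never none, and under A's startswith guards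
-- part always contains '=', so index 1 never raises (pyGetD's default is unreachable there)
def pvValA (part : String) : String :=
  PySem.List.pyGetD ((PySem.Str.splitMax? part "=" 1).getD []) 1 ""

-- the body of A's first for-loop
def pvStepA (st : String × String) (part : String) : String × String :=
  if PySem.Str.startswith part "entity_type=" then (pvValA part, st.2)
  else if PySem.Str.startswith part "name=" then (st.1, pvValA part)
  else st

-- the body of A's second for-loop (over parts[1:])
def pvStepE (et : String) (p : String) : String :=
  if PySem.Str.startswith p "entity_type=" then pvValA p else et

def parse_header_py (header : String) : String × String :=
  -- header.split("|"): "|" ≠ "" so split? is never none; the result is always nonempty,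
  -- so Python's parts[0] never raises (pyGet?'s fallback "" is unreachable)
  let parts := (PySem.Str.split? header "|").getD []
  let entity_type := "protein"
  let name := (PySem.List.pyGet? parts 0).getD ""
  let st := parts.foldl pvStepA (entity_type, name)
  let p0 := (PySem.List.pyGet? parts 0).getD ""
  if PySem.Str.startswith p0 "chain_" && decide (1 < parts.length) then
    let et := (PySem.List.slice parts (some 1) none).foldl pvStepE st.1
    (et, p0)
  else st

-- ===== PORT B =====
-- k, v = part.split("=", 1) (guarded by '=' in part, so the split has exactly two pieces)
def pvKV (part : String) : String × String :=
  let pieces := (PySem.Str.splitMax? part "=" 1).getD []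
  (PySem.List.pyGetD pieces 0 "", PySem.List.pyGetD pieces 1 "")

-- the body of B's table-building loop
def pvStepB (d : PySem.Dict String String) (part : String) : PySem.Dict String String :=
  if PySem.Str.isIn "=" part then d.insert (pvKV part).1 (pvKV part).2 else d

def parse_header_py_alt (header : String) : String × String :=
  let parts := (PySem.Str.split? header "|").getD []   -- "|" ≠ "": never none; result nonempty
  let kv := parts.foldl pvStepB PySem.Dict.empty
  let p0 := (PySem.List.pyGet? parts 0).getD ""
  let name := if PySem.Str.startswith p0 "chain_" && decide (1 < parts.length) then p0
              else kv.getD "name" p0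
  (kv.getD "entity_type" "protein", name)

-- ===== PRECONDITION & SPEC =====
def Spec_parse_header_py (header : String) (out : String × String) : Prop := out = parse_header_py_alt header
instance (header : String) (out : String × String) : Decidable (Spec_parse_header_py header out) := by unfold Spec_parse_header_py; infer_instance

-- ===== CLAIM (what is proved, stated in full; the proofs are below) =====
def Claim_equal_parse_header_py : Prop := ∀ (header : String), Dom_parse_header_py header → Spec_parse_header_py header (parse_header_py header)

-- ===== LEMMAS AND PROOFS =====

lemma go_zero (fuel : Nat) (hf : 0 < fuel) (l cur : List Char) (acc : List (List Char)) :
    PySem.Chars.splitOnMax.go ['='] fuel 0 l cur acc = ((cur.reverse ++ l) :: acc).reverse := by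
  obtain ⟨f, rfl⟩ := Nat.exists_eq_succ_of_ne_zero hf.ne'
  rw [PySem.Chars.splitOnMax.go.eq_def]
  cases l with
  | nil => simp
  | cons c rest => simp

lemma go_one (a : List Char) : ∀ (b cur : List Char) (acc : List (List Char)) (fuel : Nat),
    '=' ∉ a → a.length + b.length + 2 ≤ fuel →
    PySem.Chars.splitOnMax.go ['='] fuel 1 (a ++ '=' :: b) cur acc = (b :: (cur.reverse ++ a) :: acc).reverse := by
  induction a with
  | nil =>
    intro b cur acc fuel _ hf
    obtain ⟨f, rfl⟩ := Nat.exists_eq_succ_of_ne_zero (by omega : fuel ≠ 0)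
    rw [PySem.Chars.splitOnMax.go.eq_def]
    simp only [List.nil_append]
    have hpre : List.isPrefixOf ['='] ('=' :: b) = true := by simp [List.isPrefixOf]
    simp only [hpre, if_true, if_neg (by omega : ¬ (1 = 0))]
    rw [go_zero f (by omega) _ _ _]
    simp
  | cons c a ih =>
    intro b cur acc fuel hne hf
    obtain ⟨f, rfl⟩ := Nat.exists_eq_succ_of_ne_zero (by omega : fuel ≠ 0)
    rw [PySem.Chars.splitOnMax.go.eq_def]
    have hc : c ≠ '=' := fun h => hne (by simp [h])
    simp only [List.cons_append]
    rw [if_neg (by omega : ¬ (1 = 0))]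
    rw [if_neg (by simp [List.isPrefixOf, Ne.symm hc])]
    rw [ih b (c :: cur) acc f (fun h => hne (List.mem_cons_of_mem _ h)) (by simp at hf ⊢; omega)]
    simp

lemma split2 (a b : List Char) (h : '=' ∉ a) :
    PySem.Chars.splitOnMax (a ++ '=' :: b) ['='] 1 = [a, b] := by
  rw [PySem.Chars.splitOnMax]
  rw [if_neg (by omega)]
  simp only [Int.toNat_one]
  rw [go_one a b [] [] _ h (by simp)]
  simp

lemma decomp (p : List Char) (h : '=' ∈ p) : ∃ a b, p = a ++ '=' :: b ∧ '=' ∉ a := by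
  induction p with
  | nil => simp at h
  | cons c rest ih =>
    by_cases hc : c = '='
    · exact ⟨[], rest, by simp [hc], by simp⟩
    · obtain ⟨a, b, rfl, ha⟩ := ih (by
        rcases List.mem_cons.mp h with h' | h'
        · exact absurd h'.symm hc
        · exact h')
      exact ⟨c :: a, b, rfl, by simp [Ne.symm hc, ha]⟩

lemma uniq : ∀ (a c b d : List Char), '=' ∉ a → '=' ∉ c → a ++ '=' :: b = c ++ '=' :: d → a = c ∧ b = d := by
  intro a
  induction a with
  | nil =>
    intro c b d _ hc h
    cases c with
    | nil => simpa using h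
    | cons x c =>
      simp only [List.nil_append, List.cons_append, List.cons.injEq] at h
      exact absurd (h.1 ▸ List.mem_cons_self : '=' ∈ x :: c) hc
  | cons x a ih =>
    intro c b d ha hc h
    cases c with
    | nil =>
      simp only [List.nil_append, List.cons_append, List.cons.injEq] at h
      exact absurd (h.1.symm ▸ List.mem_cons_self : '=' ∈ x :: a) ha
    | cons y c =>
      simp only [List.cons_append, List.cons.injEq] at h
      obtain ⟨h1, h2⟩ := ih c b d (fun m => ha (List.mem_cons_of_mem _ m)) (fun m => hc (List.mem_cons_of_mem _ m)) h.2
      exact ⟨by simp [h.1, h1], h2⟩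

-- both sides' split("=", 1) on a part containing '='
lemma pieces_eq (part : String) (a b : List Char) (hp : part.toList = a ++ '=' :: b) (ha : '=' ∉ a) :
    (PySem.Str.splitMax? part "=" 1).getD [] = [String.ofList a, String.ofList b] := by
  have he : ("=" : String).toList = ['='] := by decide
  rw [PySem.Str.splitMax?, he, hp]
  rw [PySem.Chars.splitMax?, if_neg (by simp)]
  rw [split2 a b ha]
  rfl

lemma mem_of_isIn (part : String) (h : PySem.Str.isIn "=" part = true) : '=' ∈ part.toList := by
  rw [PySem.Str.isIn_eq] at h
  have hinf := (PySem.Chars.isIn_iff_infix _ _).1 h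
  have he : ("=" : String).toList = ['='] := by decide
  rw [he, List.singleton_infix_iff] at hinf
  exact hinf

lemma sw_iff (part pre : String) (a b key : List Char)
    (hp : part.toList = a ++ '=' :: b) (ha : '=' ∉ a)
    (hpre : pre.toList = key ++ ['=']) (hkey : '=' ∉ key) :
    PySem.Str.startswith part pre = true ↔ a = key := by
  rw [PySem.Str.startswith_eq, PySem.Chars.startswith_iff, hp, hpre]
  constructor
  · rintro ⟨t, ht⟩
    have h2 : key ++ '=' :: t = a ++ '=' :: b := by simpa using ht
    exact ((uniq key a t b hkey ha h2).1).symm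
  · rintro rfl; exact ⟨b, by simp⟩

lemma sw_false_of_no_eq (part pre : String) (key : List Char)
    (hpre : pre.toList = key ++ ['=']) (h : PySem.Str.isIn "=" part = false) :
    PySem.Str.startswith part pre = false := by
  by_contra hne
  rw [Bool.not_eq_false, PySem.Str.startswith_eq, PySem.Chars.startswith_iff, hpre] at hne
  have hmem : '=' ∈ part.toList := by
    obtain ⟨t, ht⟩ := hne
    rw [← ht]; simp
  rw [PySem.Str.isIn_eq] at h
  have he : ("=" : String).toList = ['='] := by decide
  rw [PySem.Chars.isIn_eq_false_iff, he, List.singleton_infix_iff] at h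
  exact h hmem

lemma chain_no_kv (p0 : String) (h : PySem.Str.startswith p0 "chain_" = true) :
    PySem.Str.startswith p0 "entity_type=" = false ∧ PySem.Str.startswith p0 "name=" = false := by
  rw [PySem.Str.startswith_eq, PySem.Chars.startswith_iff] at h
  constructor
  · by_contra hne
    rw [Bool.not_eq_false, PySem.Str.startswith_eq, PySem.Chars.startswith_iff] at hne
    rcases List.prefix_or_prefix_of_prefix h hne with h' | h' <;> revert h' <;> decide
  · by_contra hne
    rw [Bool.not_eq_false, PySem.Str.startswith_eq, PySem.Chars.startswith_iff] at hne
    rcases List.prefix_or_prefix_of_prefix h hne with h' | h' <;> revert h' <;> decide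

-- A's pair-loop projected to its entity_type component
lemma projE (l : List String) : ∀ (st : String × String), (l.foldl pvStepA st).1 = l.foldl pvStepE st.1 := by
  induction l with
  | nil => intro st; rfl
  | cons p l ih =>
    intro st
    rw [List.foldl_cons, List.foldl_cons, ih]
    unfold pvStepA pvStepE
    split_ifs <;> rfl

-- re-running the entity_type loop from its own result changes nothing
lemma idemE (l : List String) : ∀ (x : String), l.foldl pvStepE (l.foldl pvStepE x) = l.foldl pvStepE x := by
  induction l with
  | nil => intro x; rfl
  | cons p l ih =>
    intro x
    by_cases h : PySem.Str.startswith p "entity_type=" = true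
    · simp only [List.foldl_cons, pvStepE, h, if_true]
    · simp only [List.foldl_cons, pvStepE, if_neg h]
      exact ih x

-- main loop invariant: A's (entity_type, name) state is readable from B's table
lemma loop_inv (l : List String) : ∀ (d : PySem.Dict String String) (st : String × String) (p0 : String),
    st.1 = d.getD "entity_type" "protein" → st.2 = d.getD "name" p0 →
    (l.foldl pvStepA st).1 = (l.foldl pvStepB d).getD "entity_type" "protein" ∧
    (l.foldl pvStepA st).2 = (l.foldl pvStepB d).getD "name" p0 := by
  induction l with
  | nil => intro d st p0 h1 h2; exact ⟨h1, h2⟩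
  | cons p l ih =>
    intro d st p0 h1 h2
    rw [List.foldl_cons, List.foldl_cons]
    by_cases hin : PySem.Str.isIn "=" p = true
    · obtain ⟨a, b, hp, ha⟩ := decomp p.toList (mem_of_isIn p hin)
      have hpieces := pieces_eq p a b hp ha
      have hkv : pvKV p = (String.ofList a, String.ofList b) := by
        unfold pvKV
        rw [hpieces]
        rfl
      have hvalA : pvValA p = String.ofList b := by
        rw [pvValA, hpieces]; rfl
      have hstepB : pvStepB d p = d.insert (String.ofList a) (String.ofList b) := by
        rw [pvStepB, if_pos hin, hkv]
      by_cases hE : a = "entity_type".toList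
      · have hsw : PySem.Str.startswith p "entity_type=" = true :=
          (sw_iff p "entity_type=" a b "entity_type".toList hp ha (by decide) (by decide)).2 hE
        have hofa : String.ofList a = "entity_type" := by rw [hE, String.ofList_toList]
        refine ih _ _ p0 ?_ ?_
        · rw [pvStepA, if_pos hsw, hstepB, hofa]
          rw [PySem.Dict.getD_insert_self]
          exact hvalA
        · rw [pvStepA, if_pos hsw, hstepB, hofa]
          rw [PySem.Dict.getD_insert_of_ne _ _ _ (by decide)]
          exact h2
      · by_cases hN : a = "name".toList
        · have hswE : PySem.Str.startswith p "entity_type=" = false := by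
            rw [← Bool.not_eq_true]
            exact fun hh => hE ((sw_iff p "entity_type=" a b "entity_type".toList hp ha (by decide) (by decide)).1 hh)
          have hswN : PySem.Str.startswith p "name=" = true :=
            (sw_iff p "name=" a b "name".toList hp ha (by decide) (by decide)).2 hN
          have hofa : String.ofList a = "name" := by rw [hN, String.ofList_toList]
          refine ih _ _ p0 ?_ ?_
          · rw [pvStepA, hswE, if_neg (by simp), if_pos hswN, hstepB, hofa]
            rw [PySem.Dict.getD_insert_of_ne _ _ _ (by decide)]
            exact h1
          · rw [pvStepA, hswE, if_neg (by simp), if_pos hswN, hstepB, hofa]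
            rw [PySem.Dict.getD_insert_self]
            exact hvalA
        · have hswE : PySem.Str.startswith p "entity_type=" = false := by
            rw [← Bool.not_eq_true]
            exact fun hh => hE ((sw_iff p "entity_type=" a b "entity_type".toList hp ha (by decide) (by decide)).1 hh)
          have hswN : PySem.Str.startswith p "name=" = false := by
            rw [← Bool.not_eq_true]
            exact fun hh => hN ((sw_iff p "name=" a b "name".toList hp ha (by decide) (by decide)).1 hh)
          have hneE : ("entity_type" : String) ≠ String.ofList a := by
            intro hh
            exact hE (by simpa using congrArg String.toList hh.symm)
          have hneN : ("name" : String) ≠ String.ofList a := by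
            intro hh
            exact hN (by simpa using congrArg String.toList hh.symm)
          refine ih _ _ p0 ?_ ?_
          · rw [pvStepA, hswE, if_neg (by simp), hswN, if_neg (by simp), hstepB]
            rw [PySem.Dict.getD_insert_of_ne _ _ _ hneE]
            exact h1
          · rw [pvStepA, hswE, if_neg (by simp), hswN, if_neg (by simp), hstepB]
            rw [PySem.Dict.getD_insert_of_ne _ _ _ hneN]
            exact h2
    · have hin' : PySem.Str.isIn "=" p = false := by
        revert hin; cases PySem.Str.isIn "=" p <;> simp
      have hswE := sw_false_of_no_eq p "entity_type=" "entity_type".toList (by decide) hin'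
      have hswN := sw_false_of_no_eq p "name=" "name".toList (by decide) hin'
      have hstepA : pvStepA st p = st := by
        rw [pvStepA, hswE, if_neg (by simp), hswN, if_neg (by simp)]
      have hstepB : pvStepB d p = d := by
        rw [pvStepB, hin']
        simp
      rw [hstepA, hstepB]
      exact ih d st p0 h1 h2

-- ===== VERDICT (by name: the statement is the Claim_ definition above) =====
theorem parse_header_py_spec : Claim_equal_parse_header_py := by
  intro header _
  unfold Spec_parse_header_py parse_header_py parse_header_py_alt
  dsimp only
  set parts := (PySem.Str.split? header "|").getD [] with hparts
  set p0 := (PySem.List.pyGet? parts 0).getD "" with hp0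
  obtain ⟨h1, h2⟩ := loop_inv parts PySem.Dict.empty ("protein", p0) p0
    (by rw [PySem.Dict.getD_empty]) (by rw [PySem.Dict.getD_empty])
  by_cases hcond : (PySem.Str.startswith p0 "chain_" && decide (1 < parts.length)) = true
  · rw [if_pos hcond, if_pos hcond]
    rw [Bool.and_eq_true, decide_eq_true_iff] at hcond
    obtain ⟨hchain, hlen⟩ := hcond
    refine Prod.ext ?_ rfl
    dsimp only
    rw [← h1]
    rw [PySem.List.slice_from parts (by norm_num : (0:Int) ≤ 1)]
    obtain ⟨q, rest, hqr⟩ : ∃ q rest, parts = q :: rest := by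
      cases hh : parts with
      | nil => rw [hh] at hlen; simp at hlen
      | cons q rest => exact ⟨q, rest, rfl⟩
    have hq : q = p0 := by rw [hp0, hqr]; simp [PySem.List.pyGet?, PySem.List.pyIdx?]
    have hdrop : List.drop (Int.toNat 1) parts = rest := by rw [hqr]; rfl
    rw [hdrop]
    have hA1 : (parts.foldl pvStepA ("protein", p0)).1 = rest.foldl pvStepE "protein" := by
      rw [projE, hqr, List.foldl_cons]
      have hnop : pvStepE "protein" q = "protein" := by
        rw [pvStepE, hq, (chain_no_kv p0 hchain).1]
        simp
      rw [hnop]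
    rw [hA1, idemE]
  · rw [if_neg hcond, if_neg hcond]
    exact Prod.ext h1 h2
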